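-- pv_equiv track=rewrite | github.com/shravanasati/advent-of-code | 2025/day9/b.py | _build_interval_index
-- ===== SOURCE A (Python) =====
-- from collections import defaultdict
-- from typing import DefaultDict, Iterable
--
-- def _build_interval_index(segments: list[tuple[int, int, int, int]]):
--     horiz: DefaultDict[int, list[tuple[int, int]]] = defaultdict(list)
--     vert: DefaultDict[int, list[tuple[int, int]]] = defaultdict(list)
--     vertical_edges: list[tuple[int, int, int]] = []  # (x, y_low, y_high)
--
--     for x1, y1, x2, y2 in segments:
--         if y1 == y2:
--             horiz[y1].append((x1, x2))
--         else:
--             vert[x1].append((y1, y2))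
--             vertical_edges.append((x1, y1, y2))
--
--     for y, intervals in horiz.items():
--         intervals.sort()
--     for x, intervals in vert.items():
--         intervals.sort()
--
--     return horiz, vert, vertical_edges
-- ===== SOURCE B (Python) =====
-- from collections import defaultdict
--
--
-- def _build_interval_index(segments: list[tuple[int, int, int, int]]):
--     # split once: (key, payload) projections of the horizontal / vertical segments
--     hseg = [(y1, (x1, x2)) for x1, y1, x2, y2 in segments if y1 == y2]
--     vseg = [(x1, (y1, y2)) for x1, y1, x2, y2 in segments if y1 != y2]
--
--     horiz: defaultdict[int, list[tuple[int, int]]] = defaultdict(list)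
--     for y in dict.fromkeys(k for k, _ in hseg):
--         horiz[y] = sorted(iv for k, iv in hseg if k == y)
--
--     vert: defaultdict[int, list[tuple[int, int]]] = defaultdict(list)
--     for x in dict.fromkeys(k for k, _ in vseg):
--         vert[x] = sorted(iv for k, iv in vseg if k == x)
--
--     vertical_edges = [(x, y1, y2) for x, (y1, y2) in vseg]
--     return horiz, vert, vertical_edges
-- ===== Notes on version B (the rewrite author's own statement) =====
-- stated objective: alternative
-- what changed: A builds both defaultdicts in a single pass (appending to a mutable bucket per segment) and then sorts each bucket in place; B first splits the segments into (key, payload) projections, then builds each dict entry independently by filtering the projection per distinct key and sorting the collected payloads, with vertical_edges read off the vertical projection.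
import Mathlib
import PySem

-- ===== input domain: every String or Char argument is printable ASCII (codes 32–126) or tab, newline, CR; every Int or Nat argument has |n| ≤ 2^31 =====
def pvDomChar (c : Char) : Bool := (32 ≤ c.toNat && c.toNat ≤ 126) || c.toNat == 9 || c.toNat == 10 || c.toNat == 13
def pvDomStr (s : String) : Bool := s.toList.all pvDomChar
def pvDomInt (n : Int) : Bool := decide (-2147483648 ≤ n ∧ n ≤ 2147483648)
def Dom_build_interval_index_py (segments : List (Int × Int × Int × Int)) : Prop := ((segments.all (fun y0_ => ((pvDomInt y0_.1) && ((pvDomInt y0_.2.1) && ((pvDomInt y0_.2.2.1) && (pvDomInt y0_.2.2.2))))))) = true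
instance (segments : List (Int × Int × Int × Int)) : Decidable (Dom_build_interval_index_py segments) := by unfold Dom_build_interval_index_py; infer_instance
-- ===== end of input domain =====

-- B replaces A's one-pass defaultdict grouping (then per-bucket in-place sorts) by a
-- split-then-per-distinct-key-filter decomposition (objective: alternative, not faster).
-- A returns defaultdicts, B returns defaultdicts with equal contents and key order.

-- ===== PORT A =====
def build_interval_index_py (segments : List (Int × Int × Int × Int)) : (List (Int × List (Int × Int))) × (List (Int × List (Int × Int))) × (List (Int × Int × Int)) :=
  let st :=
    segments.foldl
      (fun (st : PySem.Dict Int (List (Int × Int)) × PySem.Dict Int (List (Int × Int)) × List (Int × Int × Int)) seg =>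
        if seg.2.1 == seg.2.2.2 then
          (st.1.modify seg.2.1 [] (· ++ [(seg.1, seg.2.2.1)]), st.2.1, st.2.2)
        else
          (st.1, st.2.1.modify seg.1 [] (· ++ [(seg.2.1, seg.2.2.2)]),
           st.2.2 ++ [(seg.1, seg.2.1, seg.2.2.2)]))
      (PySem.Dict.empty, PySem.Dict.empty, [])
  -- 'for y, intervals in horiz.items(): intervals.sort()' — sort each bucket in place
  (st.1.items.map (fun kv => (kv.1, PySem.List.sorted2 kv.2 Prod.fst Prod.snd)),
   st.2.1.items.map (fun kv => (kv.1, PySem.List.sorted2 kv.2 Prod.fst Prod.snd)),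
   st.2.2)

-- ===== PORT B =====
def build_interval_index_py_alt (segments : List (Int × Int × Int × Int)) : (List (Int × List (Int × Int))) × (List (Int × List (Int × Int))) × (List (Int × Int × Int)) :=
  let hseg : List (Int × Int × Int) :=
    segments.filterMap (fun s => if s.2.1 == s.2.2.2 then some (s.2.1, s.1, s.2.2.1) else none)
  let vseg : List (Int × Int × Int) :=
    segments.filterMap (fun s => if s.2.1 == s.2.2.2 then none else some (s.1, s.2.1, s.2.2.2))
  let horiz := (PySem.List.dedup (hseg.map Prod.fst)).map
    (fun y => (y, PySem.List.sorted2 ((hseg.filter (fun p => p.1 == y)).map Prod.snd) Prod.fst Prod.snd))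
  let vert := (PySem.List.dedup (vseg.map Prod.fst)).map
    (fun x => (x, PySem.List.sorted2 ((vseg.filter (fun p => p.1 == x)).map Prod.snd) Prod.fst Prod.snd))
  -- '[(x, y1, y2) for x, (y1, y2) in vseg]' — the identity reshaping of vseg's tuples
  (horiz, vert, vseg.map (fun p => (p.1, p.2.1, p.2.2)))

-- ===== PRECONDITION & SPEC =====
def Spec_build_interval_index_py (segments : List (Int × Int × Int × Int)) (out : (List (Int × List (Int × Int))) × (List (Int × List (Int × Int))) × (List (Int × Int × Int))) : Prop := out = build_interval_index_py_alt segments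
instance (segments : List (Int × Int × Int × Int)) (out : (List (Int × List (Int × Int))) × (List (Int × List (Int × Int))) × (List (Int × Int × Int))) : Decidable (Spec_build_interval_index_py segments out) := by unfold Spec_build_interval_index_py; infer_instance

-- ===== CLAIM (what is proved, stated in full; the proofs are below) =====
def Claim_equal_build_interval_index_py : Prop := ∀ (segments : List (Int × Int × Int × Int)), Dom_build_interval_index_py segments → Spec_build_interval_index_py segments (build_interval_index_py segments)

-- ===== LEMMAS AND PROOFS =====

-- A's single fold over the triple state, split into three independent folds over the
-- filtered projections (B's hseg / vseg lists).
theorem pv_fold_split (segs : List (Int × Int × Int × Int))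
    (h v : PySem.Dict Int (List (Int × Int))) (e : List (Int × Int × Int)) :
    segs.foldl
      (fun (st : PySem.Dict Int (List (Int × Int)) × PySem.Dict Int (List (Int × Int)) × List (Int × Int × Int)) seg =>
        if seg.2.1 == seg.2.2.2 then
          (st.1.modify seg.2.1 [] (· ++ [(seg.1, seg.2.2.1)]), st.2.1, st.2.2)
        else
          (st.1, st.2.1.modify seg.1 [] (· ++ [(seg.2.1, seg.2.2.2)]),
           st.2.2 ++ [(seg.1, seg.2.1, seg.2.2.2)]))
      (h, v, e) =
    ((segs.filterMap (fun s => if s.2.1 == s.2.2.2 then some ((s.2.1, s.1, s.2.2.1) : Int × Int × Int) else none)).foldl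
        (fun d p => d.modify p.1 [] (· ++ [p.2])) h,
     (segs.filterMap (fun s => if s.2.1 == s.2.2.2 then none else some ((s.1, s.2.1, s.2.2.2) : Int × Int × Int))).foldl
        (fun d p => d.modify p.1 [] (· ++ [p.2])) v,
     e ++ segs.filterMap (fun s => if s.2.1 == s.2.2.2 then none else some ((s.1, s.2.1, s.2.2.2) : Int × Int × Int))) := by
  induction segs generalizing h v e with
  | nil => simp
  | cons s t ih =>
    simp only [beq_iff_eq] at ih ⊢
    by_cases hc : s.2.1 = s.2.2.2 <;> simp [hc, ih]

-- an assoc list with distinct keys is its key list zipped with the lookups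
theorem pv_items_eq_keys_map {κ ν : Type} [BEq κ] [LawfulBEq κ]
    (d : PySem.Dict κ ν) (d0 : ν) (hn : d.keys.Nodup) :
    d.items = d.keys.map (fun k => (k, d.getD k d0)) := by
  have hk : d.keys = d.items.map Prod.fst := rfl
  rw [hk, List.map_map]
  symm
  conv_rhs => rw [← List.map_id d.items]
  apply List.map_congr_left
  intro kv hmem
  have : d.getD kv.1 d0 = kv.2 :=
    PySem.Dict.getD_of_mem_items d (by simpa using hmem) hn d0
  simp [Function.comp, this]

-- the grouping fold from the empty dict, fully characterised
theorem pv_group_items (pairs : List (Int × Int × Int)) :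
    (pairs.foldl (fun (d : PySem.Dict Int (List (Int × Int))) p => d.modify p.1 [] (· ++ [p.2]))
        PySem.Dict.empty).items =
    (PySem.List.dedup (pairs.map Prod.fst)).map
      (fun k => (k, (pairs.filter (fun p => p.1 == k)).map Prod.snd)) := by
  set d := pairs.foldl (fun (d : PySem.Dict Int (List (Int × Int))) p => d.modify p.1 [] (· ++ [p.2])) PySem.Dict.empty with hd
  have hn : d.keys.Nodup := by
    apply PySem.Dict.nodup_keys_foldl_modify_key pairs Prod.fst [] (fun _ p => (· ++ [p.2]))
    simp [PySem.Dict.empty, PySem.Dict.keys]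
  have hkeys : d.keys = PySem.List.dedup (pairs.map Prod.fst) := by
    rw [hd, PySem.Dict.keys_foldl_modify_key pairs Prod.fst [] (fun _ p => (· ++ [p.2]))]
    rw [PySem.List.dedup_eq_ofList]
    have : (PySem.Dict.empty : PySem.Dict Int (List (Int × Int))).keys = [] := rfl
    rw [this, PySem.Set.update_nil_left]
  rw [pv_items_eq_keys_map d [] hn, hkeys]
  apply List.map_congr_left
  intro k _
  congr 1
  rw [hd, PySem.Dict.getD_foldl_modify_append, PySem.Dict.getD_empty]
  simp

-- ===== VERDICT (by name: the statement is the Claim_ definition above) =====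
theorem build_interval_index_py_spec : Claim_equal_build_interval_index_py := by
  intro segments _
  unfold Spec_build_interval_index_py build_interval_index_py build_interval_index_py_alt
  rw [pv_fold_split]
  simp only [pv_group_items, List.map_map, Prod.mk.injEq]
  refine ⟨?_, ?_, ?_⟩
  · apply List.map_congr_left; intro k _; simp
  · apply List.map_congr_left; intro k _; simp
  · simp
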